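-- pv_equiv track=rewrite | github.com/TheIllusionOfLife/Eureka | src/madspark/core/enhanced_reasoning.py | _check_sequential_workflow
-- ===== SOURCE A (Python) =====
-- from typing import Dict, List, Any, Optional, TypedDict, Union
--
-- def _check_sequential_workflow(agent_sequence: List[str]) -> bool:
--     """Check if agents follow expected sequential workflow."""
--     expected_sequence = ['idea_generator', 'critic', 'advocate', 'skeptic']
--
--     # Find the longest matching subsequence
--     matches = 0
--     seq_index = 0
--
--     for agent in agent_sequence:
--         if seq_index < len(expected_sequence) and agent == expected_sequence[seq_index]:
--             matches += 1
--             seq_index += 1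
--
--     return matches >= 3  # At least 3 agents in correct order
-- ===== SOURCE B (Python) =====
-- def _check_sequential_workflow(agent_sequence):
--     """Check if agents follow expected sequential workflow."""
--     targets = ['advocate', 'critic', 'idea_generator']
--     for agent in reversed(agent_sequence):
--         if agent == targets[0]:
--             targets.pop(0)
--             if not targets:
--                 return True
--     return False
-- ===== Notes on version B (the rewrite author's own statement) =====
-- stated objective: alternative
-- what changed: B scans the input BACK-TO-FRONT, consuming a shrinking list of the three required agents in reverse order and returning early once it empties, instead of A's forward pass that counts matches against an index into the 4-element expected list and compares the count to 3; correctness rests on subsequence existence being invariant under reversing both lists.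
import Mathlib
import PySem

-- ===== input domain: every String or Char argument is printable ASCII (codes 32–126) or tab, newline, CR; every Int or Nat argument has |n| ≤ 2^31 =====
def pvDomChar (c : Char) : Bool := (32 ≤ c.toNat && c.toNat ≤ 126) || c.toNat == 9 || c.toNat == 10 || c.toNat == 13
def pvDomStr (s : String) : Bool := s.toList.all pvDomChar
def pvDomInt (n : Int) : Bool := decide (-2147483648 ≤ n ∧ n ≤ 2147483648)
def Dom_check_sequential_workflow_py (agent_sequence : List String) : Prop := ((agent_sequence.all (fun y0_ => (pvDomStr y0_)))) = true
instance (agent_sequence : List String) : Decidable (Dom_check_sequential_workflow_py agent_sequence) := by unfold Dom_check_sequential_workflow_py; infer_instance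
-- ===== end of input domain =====

-- B scans the input back-to-front, consuming a shrinking list of the three required
-- agents (in reverse order) with an early return, instead of A's forward counting pass.

-- ===== PORT A =====
-- step of A's for-loop: state is (matches, seq_index)
def pvStepA (expected : List String) (st : Nat × Nat) (agent : String) : Nat × Nat :=
  if st.2 < expected.length ∧ agent = expected.getD st.2 "" then (st.1 + 1, st.2 + 1) else st

def check_sequential_workflow_py (agent_sequence : List String) : Bool :=
  let expected_sequence := ["idea_generator", "critic", "advocate", "skeptic"]
  let final := agent_sequence.foldl (pvStepA expected_sequence) (0, 0)
  decide (3 ≤ final.1)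

-- ===== PORT B =====
-- B's for-loop over reversed(agent_sequence) with the mutable `targets` list threaded
-- through; `targets` is nonempty at every loop head (we return True the moment it
-- empties), so targets[0] is `headD` and targets.pop(0) is `drop 1` — exact here.
def pvLoopB : List String → List String → Bool
  | [], _ => false
  | agent :: rest, targets =>
    if agent = targets.headD "" then
      let targets' := targets.drop 1
      if targets' = [] then true else pvLoopB rest targets'
    else pvLoopB rest targets

def check_sequential_workflow_py_alt (agent_sequence : List String) : Bool :=
  pvLoopB agent_sequence.reverse ["advocate", "critic", "idea_generator"]

-- ===== PRECONDITION & SPEC =====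
def Spec_check_sequential_workflow_py (agent_sequence : List String) (out : Bool) : Prop := out = check_sequential_workflow_py_alt agent_sequence
instance (agent_sequence : List String) (out : Bool) : Decidable (Spec_check_sequential_workflow_py agent_sequence out) := by unfold Spec_check_sequential_workflow_py; infer_instance

-- ===== CLAIM (what is proved, stated in full; the proofs are below) =====
def Claim_equal_check_sequential_workflow_py : Prop := ∀ (agent_sequence : List String), Dom_check_sequential_workflow_py agent_sequence → Spec_check_sequential_workflow_py agent_sequence (check_sequential_workflow_py agent_sequence)

-- ===== LEMMAS AND PROOFS =====

-- proof-only helper: the forward greedy subsequence matcher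
def pvGreedy : List String → List String → Bool
  | [], _ => true
  | _ :: _, [] => false
  | t :: ts, a :: s => if a = t then pvGreedy ts s else pvGreedy (t :: ts) s

lemma pvGreedy_cons (t a : String) (ts s : List String) :
    pvGreedy (t :: ts) (a :: s) = if a = t then pvGreedy ts s else pvGreedy (t :: ts) s := rfl

-- forward greedy decides sublist
lemma pvGreedy_eq_sublist : ∀ (s ts : List String),
    pvGreedy ts s = decide (List.Sublist ts s) := by
  intro s
  induction s with
  | nil =>
    intro ts
    cases ts with
    | nil => simp [pvGreedy]
    | cons t ts => simp [pvGreedy]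
  | cons a s ih =>
    intro ts
    cases ts with
    | nil => simp [pvGreedy]
    | cons t ts =>
      rw [pvGreedy_cons]
      by_cases h : a = t
      · subst h
        rw [if_pos rfl, ih ts]
        simp [List.cons_sublist_cons]
      · rw [if_neg h, ih (t :: ts)]
        apply Bool.decide_congr
        constructor
        · intro hs; exact hs.cons a
        · intro hs
          cases hs with
          | cons _ h' => exact h'
          | cons₂ _ h' => exact absurd rfl h

-- B's loop decides sublist of the (reversed) input, for a nonempty target list
lemma pvLoopB_eq_sublist : ∀ (s ts : List String), ts ≠ [] →
    pvLoopB s ts = decide (List.Sublist ts s) := by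
  intro s
  induction s with
  | nil =>
    intro ts hne
    cases ts with
    | nil => exact absurd rfl hne
    | cons t ts => simp [pvLoopB]
  | cons a s ih =>
    intro ts hne
    cases ts with
    | nil => exact absurd rfl hne
    | cons t ts =>
      simp only [pvLoopB, List.headD_cons, List.drop_one, List.tail_cons]
      by_cases h : a = t
      · subst h
        rw [if_pos rfl]
        cases ts with
        | nil =>
          rw [if_pos rfl]
          simp [List.cons_sublist_cons]
        | cons t' ts' =>
          rw [if_neg (by simp), ih (t' :: ts') (by simp)]
          simp [List.cons_sublist_cons]
      · rw [if_neg h, ih (t :: ts) hne]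
        apply Bool.decide_congr
        constructor
        · intro hs; exact hs.cons a
        · intro hs
          cases hs with
          | cons _ h' => exact h'
          | cons₂ _ h' => exact absurd rfl h

-- ===== A's side (forward pass = forward greedy on the first three expected agents) =====

-- index-only version of A's step (matches always equals seq_index)
def pvStep1 (expected : List String) (i : Nat) (agent : String) : Nat :=
  if i < expected.length ∧ agent = expected.getD i "" then i + 1 else i

lemma pv_pair_eq (e : List String) : ∀ (s : List String) (i : Nat),
    s.foldl (pvStepA e) (i, i) = (s.foldl (pvStep1 e) i, s.foldl (pvStep1 e) i) := by
  intro s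
  induction s with
  | nil => intro i; rfl
  | cons a s ih =>
    intro i
    simp only [List.foldl_cons, pvStepA, pvStep1]
    split_ifs <;> exact ih _

lemma pv_mono (e : List String) : ∀ (s : List String) (i : Nat),
    i ≤ s.foldl (pvStep1 e) i := by
  intro s
  induction s with
  | nil => intro i; exact le_refl i
  | cons a s ih =>
    intro i
    simp only [List.foldl_cons, pvStep1]
    split_ifs with h
    · exact le_trans (Nat.le_succ i) (ih (i + 1))
    · exact ih i

-- the key invariant: with expected index i ≤ 4, A's "reached 3" is the forward greedy
-- match of the remaining first-three expected agents
lemma pv_key : ∀ (s : List String) (i : Nat), i ≤ 4 →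
    (decide (3 ≤ s.foldl (pvStep1 ["idea_generator", "critic", "advocate", "skeptic"]) i))
      = pvGreedy (["idea_generator", "critic", "advocate"].drop i) s := by
  intro s
  induction s with
  | nil =>
    intro i hi
    interval_cases i <;> simp [pvGreedy]
  | cons a s ih =>
    intro i hi
    simp only [List.foldl_cons, pvStep1]
    interval_cases i
    · by_cases h : a = "idea_generator"
      · simpa [h, pvGreedy_cons] using ih 1 (by omega)
      · simpa [h, pvGreedy_cons] using ih 0 (by omega)
    · by_cases h : a = "critic"
      · simpa [h, pvGreedy_cons] using ih 2 (by omega)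
      · simpa [h, pvGreedy_cons] using ih 1 (by omega)
    · by_cases h : a = "advocate"
      · simpa [h, pvGreedy_cons] using ih 3 (by omega)
      · simpa [h, pvGreedy_cons] using ih 2 (by omega)
    · by_cases h : a = "skeptic"
      · simp only [h, List.drop, pvGreedy]
        simp only [List.getD, List.length]
        norm_num
        exact le_trans (by omega) (pv_mono _ s 4)
      · simp only [List.drop, pvGreedy]
        simp only [List.getD, List.length]
        simp [h]
        exact le_trans (by omega) (pv_mono _ s 3)
    · simp only [List.drop, pvGreedy]
      simp only [List.getD, List.length]
      norm_num
      exact le_trans (by omega) (pv_mono _ s 4)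

-- ===== VERDICT (by name: the statement is the Claim_ definition above) =====
theorem check_sequential_workflow_py_spec : Claim_equal_check_sequential_workflow_py := by
  intro s _
  show _ = _
  unfold check_sequential_workflow_py check_sequential_workflow_py_alt
  simp only [pv_pair_eq]
  rw [pv_key s 0 (by omega)]
  rw [pvLoopB_eq_sublist s.reverse ["advocate", "critic", "idea_generator"] (by simp)]
  rw [pvGreedy_eq_sublist]
  apply Bool.decide_congr
  have : (["advocate", "critic", "idea_generator"] : List String)
      = (["idea_generator", "critic", "advocate"] : List String).reverse := rfl
  rw [this, List.reverse_sublist]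
  simp
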